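-- pv_equiv track=rewrite | github.com/afgraciano/Inteligencia_Artificial | laboratorio2/laboratorio24.py | make_heaps
-- ===== SOURCE A (Python) =====
-- def make_heaps(c, n_heaps=3):
--     assert n_heaps % 2 == 1, "debe tener un número impar de montones"
--     assert len(c) % n_heaps == 0, "la longitud de la baraja debe ser un múltiplo del número de montones"
--
--     # Calculate how many cards each pile should have
--     cartas_por_monton = len(c) // n_heaps
--
--     # Initialize a list to store the piles
--     montones = [[] for _ in range(n_heaps)]
--
--     # Divide the cards into piles
--     for i, carta in enumerate(c):
--         monton_actual = i % n_heaps
--         montones[monton_actual].append(carta)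
--
--     return montones
-- ===== SOURCE B (Python) =====
-- def make_heaps(c, n_heaps=3):
--     assert n_heaps % 2 == 1, "debe tener un número impar de montones"
--     assert len(c) % n_heaps == 0, "la longitud de la baraja debe ser un múltiplo del número de montones"
--     # pile i holds the cards at positions i, i+n_heaps, i+2*n_heaps, ...
--     return [list(c[i::n_heaps]) for i in range(n_heaps)]
-- ===== Notes on version B (the rewrite author's own statement) =====
-- stated objective: idiomatic
-- what changed: Instead of scanning all cards and appending each to pile i%n_heaps, B builds each pile directly by strided slicing c[i::n_heaps] in a comprehension over the piles.
import Mathlib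
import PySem

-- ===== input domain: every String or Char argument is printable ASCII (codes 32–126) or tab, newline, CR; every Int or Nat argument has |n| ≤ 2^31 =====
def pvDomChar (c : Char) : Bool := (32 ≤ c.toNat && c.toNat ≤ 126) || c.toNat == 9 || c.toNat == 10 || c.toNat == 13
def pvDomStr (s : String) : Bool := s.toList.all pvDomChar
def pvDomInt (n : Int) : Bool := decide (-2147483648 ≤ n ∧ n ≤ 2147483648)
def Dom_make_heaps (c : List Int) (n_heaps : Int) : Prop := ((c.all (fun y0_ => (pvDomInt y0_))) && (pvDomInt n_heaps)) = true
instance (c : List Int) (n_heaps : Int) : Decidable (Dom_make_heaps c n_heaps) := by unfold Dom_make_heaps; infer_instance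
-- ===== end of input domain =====

-- B replaces A's scan-all-cards-and-append-by-i%n loop with one strided slice per pile (idiomatic; same cost).


-- ===== PORT A =====
-- Literal port of A: build n_heaps empty piles, then scan enumerate(c) appending each card to pile i % n_heaps.
-- montones[k].append(x) is List.modify; under Pre_ the index is in range (Python raises IndexError otherwise).
def make_heaps (c : List Int) (n_heaps : Int) : List (List Int) :=
  let _cartas_por_monton := PySem.Int.floordiv (c.length : Int) n_heaps  -- computed and unused, as in A
  let montones : List (List Int) := (List.range n_heaps.toNat).map (fun _ => [])
  (PySem.List.enumerate c 0).foldl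
    (fun montones p =>
      let monton_actual := PySem.Int.mod p.1 n_heaps
      montones.modify monton_actual.toNat (fun m => m ++ [p.2]))
    montones

-- ===== PORT B =====
-- Literal port of B: [list(c[i::n_heaps]) for i in range(n_heaps)]; slice? is none only for step 0 (excluded by Pre_).
def make_heaps_alt (c : List Int) (n_heaps : Int) : List (List Int) :=
  (PySem.List.pyRange 0 n_heaps 1).map
    (fun i => (PySem.List.slice? c (some i) none n_heaps).getD [])

-- ===== PRECONDITION & SPEC =====
-- Exactly where A returns: both asserts pass (n_heaps odd in Python's sense, len(c) % n_heaps == 0),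
-- and no IndexError from a negative pile index (n_heaps > 0, or c empty so the loop never runs).
def Pre_make_heaps (c : List Int) (n_heaps : Int) : Prop :=
  PySem.Int.mod n_heaps 2 = 1 ∧ PySem.Int.mod (c.length : Int) n_heaps = 0 ∧ (0 < n_heaps ∨ c = [])
instance (c : List Int) (n_heaps : Int) : Decidable (Pre_make_heaps c n_heaps) := by unfold Pre_make_heaps; infer_instance
def pvWitness_make_heaps : List Int × Int := ([1, 2, 3, 4, 5, 6], 3)

def Spec_make_heaps (c : List Int) (n_heaps : Int) (out : List (List Int)) : Prop := out = make_heaps_alt c n_heaps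
instance (c : List Int) (n_heaps : Int) (out : List (List Int)) : Decidable (Spec_make_heaps c n_heaps out) := by unfold Spec_make_heaps; infer_instance

-- ===== CLAIM (what is proved, stated in full; the proofs are below) =====
def Claim_equal_make_heaps : Prop := ∀ (c : List Int) (n_heaps : Int), Dom_make_heaps c n_heaps → Pre_make_heaps c n_heaps → Spec_make_heaps c n_heaps (make_heaps c n_heaps)

-- ===== LEMMAS AND PROOFS =====

-- the cards of xs (enumerated from s) that A's loop sends to pile t
def pickN (xs : List Int) (s n : Int) (t : Nat) : List Int :=
  (PySem.List.enumerate xs s).filterMap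
    (fun p => if (PySem.Int.mod p.1 n).toNat = t then some p.2 else none)

lemma fact2 (m d : Nat) (hm : 0 < m) (h : m ∣ d) : (d + m - 1) / m = d / m := by
  obtain ⟨q, rfl⟩ := h
  rcases Nat.eq_zero_or_pos q with hq | hq
  · subst hq; simp [Nat.div_eq_of_lt (by omega : m - 1 < m)]
  · have e1 : q * m = m * q := Nat.mul_comm q m
    have e2 : (m * q + m - 1) / m = q :=
      Nat.div_eq_of_lt_le (by omega) (by rw [Nat.add_mul]; omega)
    rw [e2, Nat.mul_div_cancel_left q hm]

lemma fact3 (m d : Nat) (hm : 0 < m) (h : ¬ m ∣ d) : (d + m - 1) / m = d / m + 1 := by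
  have hr : d % m ≠ 0 := fun h0 => h (Nat.dvd_of_mod_eq_zero h0)
  have hrm : d % m < m := Nat.mod_lt _ hm
  have hd : m * (d / m) + d % m = d := Nat.div_add_mod d m
  have e1 : (d / m) * m = m * (d / m) := Nat.mul_comm _ _
  have e2 : (d / m + 1) * m = (d / m) * m + m := by ring
  have e3 : (d / m + 1 + 1) * m = (d / m) * m + 2 * m := by ring
  exact Nat.div_eq_of_lt_le (by omega) (by omega)

lemma fact4 (m t d : Nat) (hm : 0 < m) (ht : t < m) : (t + d) % m = t ↔ m ∣ d := by
  constructor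
  · intro h
    have h1 : (t + d) % m = (t + d % m) % m := by
      rw [Nat.add_mod t d m, Nat.mod_eq_of_lt ht, Nat.add_mod t (d % m) m,
        Nat.mod_eq_of_lt ht, Nat.mod_mod_of_dvd _ dvd_rfl]
    have hrm : d % m < m := Nat.mod_lt _ hm
    rcases Nat.lt_or_ge (t + d % m) m with hlt | hge
    · rw [h1, Nat.mod_eq_of_lt hlt] at h
      exact Nat.dvd_of_mod_eq_zero (by omega)
    · have h2 : (t + d % m) % m = t + d % m - m := by
        rw [Nat.mod_eq_sub_mod hge, Nat.mod_eq_of_lt (by omega)]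
      rw [h1, h2] at h; omega
  · rintro ⟨q, rfl⟩
    rw [Nat.add_mul_mod_self_left, Nat.mod_eq_of_lt ht]

lemma pickN_nil_of_le (m t : Nat) (xs : List Int) (h : xs.length ≤ t) :
    pickN xs 0 (m : Int) t = [] := by
  rw [pickN, List.filterMap_eq_nil_iff]
  intro p hp
  obtain ⟨k, hk, rfl⟩ := (PySem.List.mem_enumerate_iff _ _ _).mp hp
  have : (PySem.Int.mod (0 + (k:Int)) (m:Int)).toNat = k % m := by
    rw [zero_add, PySem.Int.mod_natCast, Int.toNat_natCast]
  rw [this]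
  have := Nat.mod_le k m
  simp only [ite_eq_right_iff]
  intro he; omega

lemma pickN_append_singleton (ds : List Int) (x : Int) (n : Int) (t : Nat) :
    pickN (ds ++ [x]) 0 n t
    = pickN ds 0 n t ++ (if (PySem.Int.mod (0 + (ds.length:Int)) n).toNat = t then [x] else []) := by
  simp only [pickN, PySem.List.enumerate_append, PySem.List.enumerate_cons,
    PySem.List.enumerate_nil, List.filterMap_append, List.filterMap_cons, List.filterMap_nil]
  split_ifs <;> simp

lemma strided_pick (m t : Nat) (hm : 0 < m) (ht : t < m) :
    ∀ xs : List Int, t ≤ xs.length →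
    (List.range ((xs.length - t + m - 1) / m)).filterMap (fun k => xs[t + m * k]?)
    = pickN xs 0 (m : Int) t := by
  intro xs
  induction xs using List.reverseRecOn with
  | nil =>
    intro h
    have ht0 : t = 0 := by simpa using h
    subst ht0
    simp [pickN, PySem.List.enumerate_nil]
  | append_singleton ds x ih =>
    intro h
    simp only [List.length_append, List.length_cons, List.length_nil, Nat.zero_add] at h
    rw [pickN_append_singleton]
    have hLmod : (PySem.Int.mod (0 + (ds.length:Int)) (m:Int)).toNat = ds.length % m := by
      rw [zero_add, PySem.Int.mod_natCast, Int.toNat_natCast]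
    rw [hLmod]
    simp only [List.length_append, List.length_cons, List.length_nil]
    set L := ds.length with hL
    rcases Nat.lt_or_ge t (L + 1) with htl | hge
    · -- t ≤ L
      have htL : t ≤ L := by omega
      set d := L - t with hd
      have harith : (L + 1 - t + m - 1) / m = d / m + 1 := by
        have : L + 1 - t + m - 1 = d + m := by omega
        rw [this, Nat.add_div_right _ hm]
      rw [harith, List.range_succ, List.filterMap_append]
      set q := d / m with hq
      by_cases hdvd : m ∣ d
      · have hqm : m * q = d := Nat.mul_div_cancel' hdvd
        have hidx : t + m * q = L := by omega
        have hlast : List.filterMap (fun k => (ds ++ [x])[t + m * k]?) [q] = [x] := by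
          simp only [List.filterMap_cons, List.filterMap_nil, hidx, hL,
            List.getElem?_concat_length]
        rw [hlast]
        have hfront : List.filterMap (fun k => (ds ++ [x])[t + m * k]?) (List.range q)
            = List.filterMap (fun k => ds[t + m * k]?) (List.range q) := by
          apply List.filterMap_congr
          intro k hk
          have hk' : k < q := List.mem_range.mp hk
          have hlt : t + m * k < L := by
            have ha : m * (k + 1) ≤ m * q := Nat.mul_le_mul_left m hk'
            have hb : m * (k + 1) = m * k + m := by ring
            omega
          rw [List.getElem?_append_left (by omega)]
        rw [hfront]
        have hcnt : (L - t + m - 1) / m = q := by rw [← hd, fact2 m d hm hdvd]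
        rw [← hcnt, ih htL]
        have hcond : L % m = t := by
          have : L = t + d := by omega
          rw [this, (fact4 m t d hm ht).mpr hdvd]
        rw [if_pos hcond]
      · have hcomm : q * m = m * q := Nat.mul_comm _ _
        have hmq : m * q ≤ d := by rw [hq, Nat.mul_comm]; exact Nat.div_mul_le_self d m
        have hmq' : m * q ≠ d := fun he => hdvd ⟨q, he.symm⟩
        have hltd : m * q < d := lt_of_le_of_ne hmq hmq'
        have hlast : List.filterMap (fun k => (ds ++ [x])[t + m * k]?) [q]
            = List.filterMap (fun k => ds[t + m * k]?) [q] := by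
          have : t + m * q < L := by omega
          simp only [List.filterMap_cons, List.filterMap_nil]
          rw [List.getElem?_append_left (by omega)]
        have hfront : List.filterMap (fun k => (ds ++ [x])[t + m * k]?) (List.range q)
            = List.filterMap (fun k => ds[t + m * k]?) (List.range q) := by
          apply List.filterMap_congr
          intro k hk
          have hk' : k < q := List.mem_range.mp hk
          have : m * k ≤ m * q := Nat.mul_le_mul_left m (Nat.le_of_lt hk')
          rw [List.getElem?_append_left (by omega)]
        rw [hlast, hfront, ← List.filterMap_append, ← List.range_succ, Nat.succ_eq_add_one]
        have hcnt : (L - t + m - 1) / m = q + 1 := by rw [← hd, fact3 m d hm hdvd]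
        rw [← hcnt, ih htL]
        have hcond : L % m ≠ t := by
          intro he
          have : L = t + d := by omega
          rw [this] at he
          exact hdvd ((fact4 m t d hm ht).mp he)
        rw [if_neg hcond]
        simp
    · -- t = L + 1
      have ht1 : t = L + 1 := by omega
      have hcnt : (L + 1 - t + m - 1) / m = 0 := by
        have : L + 1 - t + m - 1 = m - 1 := by omega
        rw [this]; exact Nat.div_eq_of_lt (by omega)
      rw [hcnt]
      have hcond : L % m ≠ t := by have := Nat.mod_le L m; omega
      rw [if_neg hcond, pickN_nil_of_le m t ds (by omega)]
      simp

lemma pickN_cons (x : Int) (xs : List Int) (s n : Int) (t : Nat) :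
    pickN (x :: xs) s n t
    = (if (PySem.Int.mod s n).toNat = t then [x] else []) ++ pickN xs (s + 1) n t := by
  simp only [pickN, PySem.List.enumerate_cons, List.filterMap_cons]
  split_ifs <;> simp

lemma loopA (n : Int) (xs : List Int) : ∀ (s : Int) (ms : List (List Int)),
    (PySem.List.enumerate xs s).foldl
      (fun montones p => montones.modify (PySem.Int.mod p.1 n).toNat (fun m => m ++ [p.2])) ms
    = ms.mapIdx (fun t mt => mt ++ pickN xs s n t) := by
  induction xs with
  | nil =>
    intro s ms
    simp only [pickN, PySem.List.enumerate_nil, List.foldl_nil, List.filterMap_nil,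
      List.append_nil]
    apply List.ext_getElem (by simp); intro i h1 h2; simp
  | cons x xs ih =>
    intro s ms
    rw [PySem.List.enumerate_cons, List.foldl_cons, ih]
    apply List.ext_getElem
    · simp
    · intro i h1 h2
      simp only [List.getElem_mapIdx, List.getElem_modify, pickN_cons]
      split_ifs with h
      · simp [List.append_assoc]
      · simp

lemma makeA (xs : List Int) (n : Int) :
    make_heaps xs n = (List.range n.toNat).map (fun t => pickN xs 0 n t) := by
  unfold make_heaps
  rw [loopA]
  apply List.ext_getElem
  · simp
  · intro i h1 h2
    simp [List.getElem_mapIdx]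

lemma slice_closed (xs : List Int) (m : Nat) (hm : 0 < m) (t : Nat) :
    PySem.List.slice? xs (some (t : Int)) none (m : Int)
    = some ((List.range (if min (t:Int) xs.length < (xs.length:Int) then (((xs.length:Int) - min (t:Int) xs.length + m - 1) / m).toNat else 0)).filterMap
        (fun k : Nat => xs[(min (t:Int) xs.length + (m:Int) * (k:Int)).toNat]?)) := by
  have h0 : (m:Int) ≠ 0 := by exact_mod_cast hm.ne'
  have h1 : ¬ ((m:Int) < 0) := by omega
  have h2 : ¬ ((t:Int) < 0) := by omega
  simp only [PySem.List.slice?, PySem.List.sliceIndices, if_neg h0, if_neg h1, if_neg h2,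
    if_pos (show (0:Int) < m by exact_mod_cast hm)]

lemma slice_pick (xs : List Int) (m : Nat) (hm : 0 < m) (t : Nat) (ht : t < m) :
    (PySem.List.slice? xs (some (t : Int)) none (m : Int)).getD [] = pickN xs 0 (m : Int) t := by
  rw [slice_closed xs m hm t]
  rcases Nat.lt_or_ge t xs.length with hlt | hge
  · have hmin : min (t:Int) xs.length = (t:Int) := min_eq_left (by exact_mod_cast hlt.le)
    have hcond : min (t:Int) xs.length < (xs.length:Int) := by rw [hmin]; exact_mod_cast hlt
    have hcnt : (((xs.length:Int) - min (t:Int) xs.length + m - 1) / m).toNat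
        = (xs.length - t + m - 1) / m := by
      rw [hmin]
      have he : ((xs.length:Int) - t + m - 1) = ((xs.length - t + m - 1 : Nat) : Int) := by
        omega
      rw [he, ← Int.natCast_div, Int.toNat_natCast]
    have hfun : (fun k : Nat => xs[(min (t:Int) xs.length + (m:Int) * (k:Int)).toNat]?)
        = (fun k : Nat => xs[t + m * k]?) := by
      funext k
      have : (min (t:Int) xs.length + (m:Int) * (k:Int)) = ((t + m * k : Nat) : Int) := by
        rw [hmin]; push_cast; ring
      rw [this, Int.toNat_natCast]
    rw [if_pos hcond, hcnt, hfun, Option.getD_some]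
    exact strided_pick m t hm ht xs hlt.le
  · have hmin : min (t:Int) xs.length = (xs.length:Int) := min_eq_right (by exact_mod_cast hge)
    have hcond : ¬ (min (t:Int) xs.length < (xs.length:Int)) := by rw [hmin]; omega
    rw [if_neg hcond, pickN_nil_of_le m t xs hge]
    simp

-- ===== VERDICT (by name: the statement is the Claim_ definition above) =====
theorem make_heaps_spec : Claim_equal_make_heaps := by
  intro c n _hdom hpre
  obtain ⟨h1, h2, h3⟩ := hpre
  unfold Spec_make_heaps
  by_cases hn : 0 < n
  · have hm : 0 < n.toNat := by omega
    have hcast : ((n.toNat : Nat) : Int) = n := Int.toNat_of_nonneg hn.le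
    rw [makeA]
    unfold make_heaps_alt
    rw [PySem.List.pyRange_one]
    have hsub : (n - 0).toNat = n.toNat := by omega
    rw [hsub, List.map_map]
    apply List.map_congr_left
    intro t htmem
    have ht : t < n.toNat := List.mem_range.mp htmem
    show pickN c 0 n t = (PySem.List.slice? c (some ((0:Int) + t)) none n).getD []
    rw [zero_add, ← hcast]
    exact (slice_pick c n.toNat hm t ht).symm
  · have hc : c = [] := h3.resolve_left hn
    subst hc
    have hz : n.toNat = 0 := by omega
    simp [make_heaps, make_heaps_alt, PySem.List.enumerate_nil, hz,
      PySem.List.pyRange_one_eq_nil (by omega : n ≤ (0:Int))]
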